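-- pv_equiv track=rewrite | github.com/Nirmal2002Cn/Veglytics | Backend/scraper.py | build_market_column_map
-- ===== SOURCE A (Python) =====
-- from typing import Dict, List, Tuple, Optional
--
-- TARGET_MARKETS = ["Colombo", "Dambulla", "Nuwara Eliya"]
--
-- def build_market_column_map(table: List[List[str]]) -> Dict[str, int]:
--     header_candidates = table[:3]
--     col_count = max(len(r) for r in table[:5])
--
--     col_keywords = {
--         "Colombo": ["peliyagoda"],
--         "Dambulla": ["dambulla"],
--         "Nuwara Eliya": ["nuwara", "eliya", "nuwaraeliya"],
--     }
--
--     col_texts = [""] * col_count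
--     for r in header_candidates:
--         for ci in range(col_count):
--             if ci < len(r):
--                 col_texts[ci] += " " + (r[ci] or "")
--
--     col_texts = [t.lower() for t in col_texts]
--
--     market_map = {}
--     for market in TARGET_MARKETS:
--         keys = col_keywords[market]
--         for ci, txt in enumerate(col_texts):
--             if any(k in txt for k in keys):
--                 market_map[market] = ci
--                 break
--
--     # fallback indices (common layout)
--     market_map.setdefault("Colombo", 1)
--     market_map.setdefault("Dambulla", 3)
--     market_map.setdefault("Nuwara Eliya", 8)
--     return market_map
-- ===== SOURCE B (Python) =====
-- TARGET_MARKETS = ["Colombo", "Dambulla", "Nuwara Eliya"]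
--
-- _MARKET_KEYS = [
--     ("Colombo", ["peliyagoda"]),
--     ("Dambulla", ["dambulla"]),
--     ("Nuwara Eliya", ["nuwara", "eliya", "nuwaraeliya"]),
-- ]
--
-- _FALLBACKS = [("Colombo", 1), ("Dambulla", 3), ("Nuwara Eliya", 8)]
--
--
-- def build_market_column_map(table):
--     col_count = max(len(r) for r in table[:5])
--
--     def col_text(ci):
--         return "".join(
--             " " + (r[ci] or "") for r in table[:3] if ci < len(r)
--         ).lower()
--
--     market_map = {}
--     for market, keys in _MARKET_KEYS:
--         ci = next(
--             (ci for ci in range(col_count)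
--              if any(k in col_text(ci) for k in keys)),
--             None,
--         )
--         if ci is not None:
--             market_map[market] = ci
--     for market, fallback in _FALLBACKS:
--         market_map.setdefault(market, fallback)
--     return market_map
-- ===== Notes on version B (the rewrite author's own statement) =====
-- stated objective: simpler
-- what changed: Drops the precomputed row-major col_texts array (built by in-place mutation over header rows) and instead derives each column's header text on demand inside a per-market first-match search over column indices, with the match pass and the fallbacks driven by one keyword table.
import Mathlib
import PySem

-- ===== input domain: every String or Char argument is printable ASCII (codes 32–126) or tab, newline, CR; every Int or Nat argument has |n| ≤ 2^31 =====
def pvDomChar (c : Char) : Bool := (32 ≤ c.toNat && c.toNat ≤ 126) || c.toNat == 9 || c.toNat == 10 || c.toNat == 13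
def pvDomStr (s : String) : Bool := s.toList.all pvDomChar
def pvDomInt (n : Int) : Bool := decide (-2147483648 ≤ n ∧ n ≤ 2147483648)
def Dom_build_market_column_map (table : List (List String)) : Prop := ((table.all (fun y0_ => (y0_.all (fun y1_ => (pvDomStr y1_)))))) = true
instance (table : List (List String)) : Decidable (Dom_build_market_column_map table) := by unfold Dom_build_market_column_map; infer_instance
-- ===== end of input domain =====

-- B is a structurally different re-implementation (no precomputed col_texts array;
-- per-market on-demand column text + one keyword/fallback table); equal return value on
-- every nonempty table; simpler, not faster.

-- ===== PORT A =====

-- one step of A's inner `for ci in range(col_count)` loop: cts[ci] += " " + (r[ci] or "")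
-- (the `or ""` is identity on strings: an empty r[ci] is falsy and yields "" again)
def pvRowStep (r : List String) (cts : List (List Char)) (ci : Nat) : List (List Char) :=
  if ci < r.length then cts.set ci ((cts.getD ci []) ++ (' ' :: (r.getD ci "").toList))
  else cts

-- A's `for ci, txt in enumerate(col_texts): if any(k in txt for k in keys): … break`
def pvFindCol_A (keys : List (List Char)) : List (Int × List Char) → Option Int
  | [] => none
  | (ci, txt) :: rest =>
    if keys.any (fun k => PySem.Chars.isIn k txt) then some ci else pvFindCol_A keys rest

def build_market_column_map (table : List (List String)) : List (String × Int) :=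
  let header_candidates := PySem.List.slice table none (some 3)
  -- max(len(r) for r in table[:5]); Python raises ValueError on an empty table (see Pre_)
  let col_count : Nat := ((PySem.List.slice table none (some 5)).map List.length).foldl max 0
  let col_keywords : PySem.Dict String (List (List Char)) :=
    PySem.Dict.ofList
      [("Colombo", ["peliyagoda".toList]),
       ("Dambulla", ["dambulla".toList]),
       ("Nuwara Eliya", ["nuwara".toList, "eliya".toList, "nuwaraeliya".toList])]
  let col_texts0 : List (List Char) := List.replicate col_count []
  let col_texts1 :=
    header_candidates.foldl (fun cts r => (List.range col_count).foldl (pvRowStep r) cts) col_texts0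
  let col_texts := col_texts1.map PySem.Chars.lower
  let market_map : PySem.Dict String Int :=
    ["Colombo", "Dambulla", "Nuwara Eliya"].foldl (fun mm market =>
      let keys := col_keywords.getD market []
      match pvFindCol_A keys (PySem.List.enumerate col_texts 0) with
      | some ci => mm.insert market ci
      | none => mm) PySem.Dict.empty
  let market_map := market_map.setdefault "Colombo" 1
  let market_map := market_map.setdefault "Dambulla" 3
  let market_map := market_map.setdefault "Nuwara Eliya" 8
  market_map.items

-- ===== PORT B =====

def pvMarketKeys : List (String × List (List Char)) :=
  [("Colombo", ["peliyagoda".toList]),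
   ("Dambulla", ["dambulla".toList]),
   ("Nuwara Eliya", ["nuwara".toList, "eliya".toList, "nuwaraeliya".toList])]

def pvFallbacks : List (String × Int) :=
  [("Colombo", 1), ("Dambulla", 3), ("Nuwara Eliya", 8)]

-- Source B's col_text(ci): "".join(" " + (r[ci] or "") for r in table[:3] if ci < len(r)).lower()
def pvColText (table : List (List String)) (ci : Nat) : List Char :=
  PySem.Chars.lower (PySem.Chars.join []
    ((PySem.List.slice table none (some 3)).filterMap (fun r =>
      if ci < r.length then some (' ' :: (r.getD ci "").toList) else none)))

def build_market_column_map_alt (table : List (List String)) : List (String × Int) :=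
  let col_count : Nat := ((PySem.List.slice table none (some 5)).map List.length).foldl max 0
  let market_map : PySem.Dict String Int :=
    pvMarketKeys.foldl (fun mm p =>
      match (List.range col_count).find?
              (fun ci => p.2.any (fun k => PySem.Chars.isIn k (pvColText table ci))) with
      | some ci => mm.insert p.1 (ci : Int)
      | none => mm) PySem.Dict.empty
  (pvFallbacks.foldl (fun mm p => mm.setdefault p.1 p.2) market_map).items

-- ===== PRECONDITION & SPEC =====
-- Pre_ excludes only the empty table, on which Python A raises ValueError (max() of an
-- empty sequence); B raises the same way there.
def Pre_build_market_column_map (table : List (List String)) : Prop := table ≠ []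
instance (table : List (List String)) : Decidable (Pre_build_market_column_map table) := by
  unfold Pre_build_market_column_map; infer_instance

def pvWitness_build_market_column_map : List (List String) := [["x", "Peliyagoda"], ["dambulla"]]

def Spec_build_market_column_map (table : List (List String)) (out : List (String × Int)) : Prop :=
  out = build_market_column_map_alt table
instance (table : List (List String)) (out : List (String × Int)) :
    Decidable (Spec_build_market_column_map table out) := by
  unfold Spec_build_market_column_map; infer_instance

-- ===== CLAIM (what is proved, stated in full; the proofs are below) =====
def Claim_equal_build_market_column_map : Prop :=
  ∀ (table : List (List String)), Dom_build_market_column_map table →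
    Pre_build_market_column_map table →
    Spec_build_market_column_map table (build_market_column_map table)

-- ===== LEMMAS AND PROOFS =====

-- the text contributed to column ci by one header row
def pvRowPiece (r : List String) (ci : Nat) : List Char :=
  if ci < r.length then ' ' :: (r.getD ci "").toList else []

theorem pvRowStep_length (r : List String) (cts : List (List Char)) (ci : Nat) :
    (pvRowStep r cts ci).length = cts.length := by
  unfold pvRowStep; split <;> simp

theorem foldl_rowStep_length (r : List String) (l : List Nat) (cts : List (List Char)) :
    (l.foldl (pvRowStep r) cts).length = cts.length := by
  induction l generalizing cts with
  | nil => rfl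
  | cons a t ih => simp [List.foldl, ih, pvRowStep_length]

theorem foldl_range'_rowStep_getD (r : List String) (m : Nat) :
    ∀ (j : Nat) (cts : List (List Char)) (i : Nat), i < cts.length →
    ((List.range' j m).foldl (pvRowStep r) cts).getD i []
      = cts.getD i [] ++ (if j ≤ i ∧ i < j + m then pvRowPiece r i else []) := by
  induction m with
  | zero => intro j cts i hi; simp
  | succ m ih =>
    intro j cts i hi
    rw [List.range'_succ, List.foldl_cons]
    rw [ih (j+1) (pvRowStep r cts j) i (by rw [pvRowStep_length]; exact hi)]
    unfold pvRowStep pvRowPiece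
    by_cases hij : i = j
    · subst hij
      have h1 : ¬ (i + 1 ≤ i) := by omega
      have h2 : i ≤ i ∧ i < i + (m + 1) := by omega
      by_cases hr : i < r.length
      · simp only [if_pos hr]
        rw [List.getD_eq_getElem?_getD, List.getElem?_set_self (by omega), Option.getD_some]
        simp [h1, h2]
      · simp only [if_neg hr]
        simp [h1, h2]
    · have heq : (if j + 1 ≤ i ∧ i < j + 1 + m then (if i < r.length then ' ' :: (r.getD i "").toList else []) else ([] : List Char))
               = (if j ≤ i ∧ i < j + (m + 1) then (if i < r.length then ' ' :: (r.getD i "").toList else []) else []) := by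
        split_ifs <;> first | rfl | omega
      by_cases hr : j < r.length
      · simp only [if_pos hr]
        rw [List.getD_eq_getElem?_getD, List.getElem?_set_ne (by omega),
            ← List.getD_eq_getElem?_getD, heq]
      · simp only [if_neg hr]
        rw [heq]

theorem foldl_rows_length (n : Nat) (rows : List (List String)) (cts : List (List Char)) :
    (rows.foldl (fun cts r => (List.range n).foldl (pvRowStep r) cts) cts).length = cts.length := by
  induction rows generalizing cts with
  | nil => rfl
  | cons r t ih => simp [List.foldl, ih, foldl_rowStep_length]

theorem foldl_rows_getD (n : Nat) (rows : List (List String)) :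
    ∀ (cts : List (List Char)), cts.length = n → ∀ i, i < n →
    (rows.foldl (fun cts r => (List.range n).foldl (pvRowStep r) cts) cts).getD i []
      = cts.getD i [] ++ (rows.map (fun r => pvRowPiece r i)).flatten := by
  induction rows with
  | nil => intro cts hlen i hi; simp
  | cons r t ih =>
    intro cts hlen i hi
    rw [List.foldl_cons]
    rw [ih ((List.range n).foldl (pvRowStep r) cts)
        (by rw [foldl_rowStep_length]; exact hlen) i hi]
    rw [List.range_eq_range', foldl_range'_rowStep_getD r n 0 cts i (by omega)]
    have : (0 : Nat) ≤ i ∧ i < 0 + n := by omega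
    simp [this]
    intro h
    exact absurd h (by omega)

theorem join_nil_flatten (ps : List (List Char)) : PySem.Chars.join [] ps = ps.flatten := by
  induction ps with
  | nil => simp [PySem.Chars.join, List.intercalate]
  | cons p t ih =>
    cases t with
    | nil => simp [PySem.Chars.join, List.intercalate]
    | cons q u =>
      rw [PySem.Chars.join_cons_cons] at *
      simp [ih]

theorem flatten_filterMap_piece (ci : Nat) (rows : List (List String)) :
    ((rows.filterMap (fun r =>
        if ci < r.length then some (' ' :: (r.getD ci "").toList) else none)).flatten)
      = (rows.map (fun r => pvRowPiece r ci)).flatten := by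
  induction rows with
  | nil => rfl
  | cons r t ih =>
    rw [List.filterMap_cons, List.map_cons]
    by_cases h : ci < r.length
    · simp only [if_pos h]
      have hp : pvRowPiece r ci = ' ' :: (r.getD ci "").toList := by simp [pvRowPiece, h]
      rw [hp, List.flatten_cons, List.flatten_cons, ih]
    · simp only [if_neg h]
      have hp : pvRowPiece r ci = [] := by simp [pvRowPiece, h]
      rw [hp, List.flatten_cons, ih, List.nil_append]

-- A's lowered col_texts list IS the table of B's on-demand column texts
theorem colTexts_eq (table : List (List String)) (n : Nat)
    (hn : n = ((PySem.List.slice table none (some 5)).map List.length).foldl max 0) :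
    (((PySem.List.slice table none (some 3)).foldl
        (fun cts r => (List.range n).foldl (pvRowStep r) cts)
        (List.replicate n [])).map PySem.Chars.lower)
      = (List.range n).map (pvColText table) := by
  apply List.ext_getElem
  · simp [foldl_rows_length]
  · intro i hi1 hi2
    have hin : i < n := by
      simpa [foldl_rows_length] using hi1
    have hlen : ((PySem.List.slice table none (some 3)).foldl
        (fun cts r => (List.range n).foldl (pvRowStep r) cts) (List.replicate n [])).length = n := by
      simp [foldl_rows_length]
    rw [List.getElem_map, List.getElem_map, List.getElem_range]
    have hg := foldl_rows_getD n (PySem.List.slice table none (some 3))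
      (List.replicate n []) (by simp) i hin
    rw [List.getD_eq_getElem (d := []) _ (by omega)] at hg
    rw [hg]
    unfold pvColText
    rw [join_nil_flatten, flatten_filterMap_piece]
    simp

-- A's enumerate/break search over a mapped range IS B's find? over the range
theorem findCol_eq_find? (keys : List (List Char)) (f : Nat → List Char) (m : Nat) :
    ∀ (j : Nat),
    pvFindCol_A keys (PySem.List.enumerate ((List.range' j m).map f) (j : Int))
      = ((List.range' j m).find?
          (fun ci => keys.any (fun k => PySem.Chars.isIn k (f ci)))).map (fun ci => (ci : Int)) := by
  induction m with
  | zero => intro j; simp [PySem.List.enumerate_nil, pvFindCol_A]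
  | succ m ih =>
    intro j
    rw [List.range'_succ, List.map_cons, PySem.List.enumerate_cons, List.find?_cons]
    unfold pvFindCol_A
    by_cases h : keys.any (fun k => PySem.Chars.isIn k (f j)) = true
    · simp [h]
    · simp only [h, if_neg]
      have : ((j : Int) + 1) = ((j + 1 : Nat) : Int) := by push_cast; ring
      rw [this, ih (j + 1)]
      simp [h]

theorem findCol_eq_find?_zero (keys : List (List Char)) (f : Nat → List Char) (n : Nat) :
    pvFindCol_A keys (PySem.List.enumerate ((List.range n).map f) 0)
      = ((List.range n).find?
          (fun ci => keys.any (fun k => PySem.Chars.isIn k (f ci)))).map (fun ci => (ci : Int)) := by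
  rw [List.range_eq_range']
  have h := findCol_eq_find? keys f n 0
  simpa using h

-- ===== VERDICT (by name: the statement is the Claim_ definition above) =====
theorem build_market_column_map_spec : Claim_equal_build_market_column_map := by
  intro table _hdom _hpre
  unfold Spec_build_market_column_map build_market_column_map build_market_column_map_alt
  simp only []
  rw [colTexts_eq table _ rfl]
  simp only [findCol_eq_find?_zero]
  simp only [pvMarketKeys, pvFallbacks, List.foldl_cons, List.foldl_nil]
  have hC : (PySem.Dict.ofList
      [("Colombo", ["peliyagoda".toList]), ("Dambulla", ["dambulla".toList]),
       ("Nuwara Eliya", ["nuwara".toList, "eliya".toList, "nuwaraeliya".toList])]).getD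
      "Colombo" ([] : List (List Char)) = ["peliyagoda".toList] := by rfl
  have hD : (PySem.Dict.ofList
      [("Colombo", ["peliyagoda".toList]), ("Dambulla", ["dambulla".toList]),
       ("Nuwara Eliya", ["nuwara".toList, "eliya".toList, "nuwaraeliya".toList])]).getD
      "Dambulla" ([] : List (List Char)) = ["dambulla".toList] := by rfl
  have hN : (PySem.Dict.ofList
      [("Colombo", ["peliyagoda".toList]), ("Dambulla", ["dambulla".toList]),
       ("Nuwara Eliya", ["nuwara".toList, "eliya".toList, "nuwaraeliya".toList])]).getD
      "Nuwara Eliya" ([] : List (List Char)) = ["nuwara".toList, "eliya".toList, "nuwaraeliya".toList] := by rfl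
  simp only [hC, hD, hN]
  cases h1 : List.find?
      (fun ci => (["peliyagoda".toList]).any fun k => PySem.Chars.isIn k (pvColText table ci))
      (List.range (List.foldl max 0 (List.map List.length (PySem.List.slice table none (some 5))))) <;>
  cases h2 : List.find?
      (fun ci => (["dambulla".toList]).any fun k => PySem.Chars.isIn k (pvColText table ci))
      (List.range (List.foldl max 0 (List.map List.length (PySem.List.slice table none (some 5))))) <;>
  cases h3 : List.find?
      (fun ci => (["nuwara".toList, "eliya".toList, "nuwaraeliya".toList]).any fun k => PySem.Chars.isIn k (pvColText table ci))
      (List.range (List.foldl max 0 (List.map List.length (PySem.List.slice table none (some 5))))) <;>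
  rfl
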